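-- pv_equiv track=rewrite | github.com/ayushhh101/nourish-agents | meal_optimizer_agent.py | _trim_to_seven_days
-- ===== SOURCE A (Python) =====
-- from typing import Dict, List
--
-- VALID_DAYS = ["Monday","Tuesday","Wednesday","Thursday","Friday","Saturday","Sunday"]
--
-- def _trim_to_seven_days(meal_plan: Dict) -> Dict:
--     """
--     Return each option with exactly the 7 canonical days (Mon..Sun), in order.
--     - Deduplicate by day name (first occurrence wins).
--     - Keep only VALID_DAYS.
--     - If a weekday is missing, it is omitted (no padding), and result is sliced to max 7.
--     """
--     options = meal_plan.get("meal_plan_options", [])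
--     trimmed_options: List[Dict] = []
--
--     for opt in options:
--         # Collect first occurrence by weekday
--         first_seen = {}
--         for d in opt.get("days", []):
--             if not isinstance(d, dict):
--                 continue
--             day_name = d.get("day")
--             if isinstance(day_name, str):
--                 day_name = day_name.capitalize()
--                 if day_name in VALID_DAYS and day_name not in first_seen:
--                     first_seen[day_name] = d
--
--         # Order by canonical weekdays and strictly cap to 7
--         ordered_days = [first_seen[d] for d in VALID_DAYS if d in first_seen][:7]
--
--         trimmed_options.append({
--             "option_name": opt.get("option_name", "Option"),
--             "days": ordered_days
--         })
--
--     return {"meal_plan_options": trimmed_options}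
-- ===== SOURCE B (Python) =====
-- from typing import Dict, List
--
-- VALID_DAYS = ["Monday","Tuesday","Wednesday","Thursday","Friday","Saturday","Sunday"]
--
-- def _norm_day(d):
--     """Canonical weekday of a day entry, or None if not a usable entry."""
--     if not isinstance(d, dict):
--         return None
--     name = d.get("day")
--     if not isinstance(name, str):
--         return None
--     name = name.capitalize()
--     return name if name in VALID_DAYS else None
--
-- def _pick(days, weekday):
--     """First entry of days whose canonical day equals weekday, else None."""
--     return next((d for d in days if _norm_day(d) == weekday), None)
--
-- def _trim_to_seven_days(meal_plan: Dict) -> Dict: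
--     def trim_opt(opt):
--         days = opt.get("days", [])
--         ordered = [d for d in (_pick(days, w) for w in VALID_DAYS) if d is not None]
--         return {"option_name": opt.get("option_name", "Option"), "days": ordered}
--     return {"meal_plan_options": [trim_opt(o) for o in meal_plan.get("meal_plan_options", [])]}
-- ===== Notes on version B (the rewrite author's own statement) =====
-- stated objective: simpler
-- what changed: B iterates the seven canonical weekdays as the outer loop and scans the option's days list for the first matching entry per weekday, so no first_seen dict, no membership test against accumulated state, and no separate reordering/capping pass are needed.
import Mathlib
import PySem

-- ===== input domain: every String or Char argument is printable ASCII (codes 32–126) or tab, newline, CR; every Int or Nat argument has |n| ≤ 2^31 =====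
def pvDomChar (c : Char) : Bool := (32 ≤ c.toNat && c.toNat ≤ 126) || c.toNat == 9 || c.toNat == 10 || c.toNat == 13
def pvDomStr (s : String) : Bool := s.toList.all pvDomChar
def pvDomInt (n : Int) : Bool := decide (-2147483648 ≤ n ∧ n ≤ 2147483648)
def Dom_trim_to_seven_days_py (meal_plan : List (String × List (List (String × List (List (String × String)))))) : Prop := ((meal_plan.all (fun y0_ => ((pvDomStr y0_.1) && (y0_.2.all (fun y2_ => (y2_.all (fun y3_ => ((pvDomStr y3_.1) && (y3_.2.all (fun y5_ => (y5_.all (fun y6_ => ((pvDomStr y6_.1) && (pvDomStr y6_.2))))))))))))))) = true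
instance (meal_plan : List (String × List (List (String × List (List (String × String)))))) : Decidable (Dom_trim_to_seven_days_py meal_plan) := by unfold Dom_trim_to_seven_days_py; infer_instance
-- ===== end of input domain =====

-- B re-orders the work: outer loop over the seven canonical weekdays with one scan of the
-- option's days per weekday, instead of A's first_seen-dict pass followed by a reorder pass.

-- ===== PORT A =====
def pvValidDays : List String :=
  ["Monday","Tuesday","Wednesday","Thursday","Friday","Saturday","Sunday"]

-- Python str.capitalize(): first char uppercased, the rest lowercased (exact on ASCII).
def pvCapitalize (s : String) : String :=
  match s.toList with
  | [] => ""
  | c :: cs => String.ofList (PySem.Chars.upperChar c :: PySem.Chars.lower cs)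

-- the body of A's inner loop over opt.get("days", []) (isinstance(d, dict) is always true here)
def pvStepA (st : PySem.Dict String (List (String × String))) (d : List (String × String)) :
    PySem.Dict String (List (String × String)) :=
  match (PySem.Dict.mk d).get? "day" with
  | none => st
  | some s =>
      let day_name := pvCapitalize s
      if pvValidDays.contains day_name && !(st.contains day_name) then st.insert day_name d else st

def pvTrimOptA (opt : List (String × List (List (String × String)))) :
    List (String × List (List (String × String))) :=
  let first_seen := ((PySem.Dict.mk opt).getD "days" []).foldl pvStepA PySem.Dict.empty
  let ordered_days :=
    ((pvValidDays.filter (fun d => first_seen.contains d)).map (fun d => first_seen.getD d [])).take 7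
  -- opt.get("option_name", "Option"): Python's default "Option" is a str, which has no value of
  -- the declared Lean type; Pre_ excludes the missing-key case, so this default ([]) is never
  -- reached on Pre_ (A and B agree there in Python — see Pre_'s comment).
  [("option_name", (PySem.Dict.mk opt).getD "option_name" []), ("days", ordered_days)]

def trim_to_seven_days_py (meal_plan : List (String × List (List (String × List (List (String × String)))))) : List (String × List (List (String × List (List (String × String))))) :=
  let options := (PySem.Dict.mk meal_plan).getD "meal_plan_options" []
  [("meal_plan_options", options.foldl (fun acc opt => acc ++ [pvTrimOptA opt]) [])]

-- ===== PORT B =====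
-- _norm_day (isinstance guards are vacuously true under the type convention)
def pvNormDay (d : List (String × String)) : Option String :=
  match (PySem.Dict.mk d).get? "day" with
  | none => none
  | some s =>
      let name := pvCapitalize s
      if pvValidDays.contains name then some name else none

-- _pick: first entry of days whose canonical day equals weekday
def pvPick (days : List (List (String × String))) (weekday : String) :
    Option (List (String × String)) :=
  days.find? (fun d => pvNormDay d == some weekday)

def pvTrimOptB (opt : List (String × List (List (String × String)))) :
    List (String × List (List (String × String))) :=
  let days := (PySem.Dict.mk opt).getD "days" []
  [("option_name", (PySem.Dict.mk opt).getD "option_name" []),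
   ("days", pvValidDays.filterMap (fun w => pvPick days w))]

def trim_to_seven_days_py_alt (meal_plan : List (String × List (List (String × List (List (String × String)))))) : List (String × List (List (String × List (List (String × String))))) :=
  [("meal_plan_options", ((PySem.Dict.mk meal_plan).getD "meal_plan_options" []).map pvTrimOptB)]

-- ===== PRECONDITION & SPEC =====
-- Pre_ excludes only inputs where some option lacks the "option_name" key: there Python A and
-- Python B both return the SAME value (the default, the str "Option"), so B matches A in Python;
-- the input is excluded solely because that str is not a value of the declared return type
-- (List of pairs), so no typed port of either program can return it.
def Pre_trim_to_seven_days_py (meal_plan : List (String × List (List (String × List (List (String × String)))))) : Prop :=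
  (((PySem.Dict.mk meal_plan).getD "meal_plan_options" []).all
    (fun opt => (PySem.Dict.mk opt).contains "option_name")) = true
instance (meal_plan : List (String × List (List (String × List (List (String × String)))))) : Decidable (Pre_trim_to_seven_days_py meal_plan) := by unfold Pre_trim_to_seven_days_py; infer_instance

def pvWitness_trim_to_seven_days_py : (List (String × List (List (String × List (List (String × String)))))) :=
  [("meal_plan_options",
    [[("option_name", []),
      ("days", [[("day", "monDAY")], [("day", "monday")], [("x", "y")], [("day", "friday")]])]])]

def Spec_trim_to_seven_days_py (meal_plan : List (String × List (List (String × List (List (String × String)))))) (out : List (String × List (List (String × List (List (String × String)))))) : Prop := out = trim_to_seven_days_py_alt meal_plan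
instance (meal_plan : List (String × List (List (String × List (List (String × String)))))) (out : List (String × List (List (String × List (List (String × String)))))) : Decidable (Spec_trim_to_seven_days_py meal_plan out) := by
  unfold Spec_trim_to_seven_days_py
  haveI h1 : DecidableEq (List (List (String × String))) := inferInstance
  haveI h2 : DecidableEq (List (String × List (List (String × String)))) := inferInstance
  haveI h3 : DecidableEq (List (List (String × List (List (String × String))))) := inferInstance
  infer_instance

-- ===== CLAIM (what is proved, stated in full; the proofs are below) =====
def Claim_equal_trim_to_seven_days_py : Prop := ∀ (meal_plan : List (String × List (List (String × List (List (String × String)))))), Dom_trim_to_seven_days_py meal_plan → Pre_trim_to_seven_days_py meal_plan → Spec_trim_to_seven_days_py meal_plan (trim_to_seven_days_py meal_plan)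

-- ===== LEMMAS AND PROOFS =====

-- A's inner-loop step only changes the lookup at w when d is w's first occurrence.
theorem pv_stepA_get? (st : PySem.Dict String (List (String × String)))
    (d : List (String × String)) (w : String) :
    (pvStepA st d).get? w =
      if pvNormDay d = some w ∧ st.contains w = false then some d else st.get? w := by
  unfold pvStepA pvNormDay
  cases hday : (PySem.Dict.mk d).get? "day" with
  | none => simp
  | some s =>
      simp only
      by_cases hv : pvValidDays.contains (pvCapitalize s) = true
      · have hvm : pvCapitalize s ∈ pvValidDays := by simpa using hv
        by_cases hw : pvCapitalize s = w
        · subst hw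
          by_cases hc : st.contains (pvCapitalize s) = true
          · simp [hvm, hc]
          · have hc' : st.contains (pvCapitalize s) = false := by
              cases h : st.contains (pvCapitalize s) with
              | true => exact absurd h hc
              | false => rfl
            simp [hvm, hc', PySem.Dict.get?_insert_self]
        · have hne : w ≠ pvCapitalize s := fun h => hw h.symm
          by_cases hc : st.contains (pvCapitalize s) = true
          · simp [hvm, hc, hw]
          · have hc' : st.contains (pvCapitalize s) = false := by
              cases h : st.contains (pvCapitalize s) with
              | true => exact absurd h hc
              | false => rfl
            simp [hvm, hc', hw, PySem.Dict.get?_insert_of_ne st d hne]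
      · have hvm' : pvCapitalize s ∉ pvValidDays := by simpa using hv
        simp [hvm']

-- A's first_seen dict looks up to exactly B's per-weekday scan.
theorem pv_foldl_get? (days : List (List (String × String)))
    (st : PySem.Dict String (List (String × String))) (w : String) :
    (days.foldl pvStepA st).get? w = (st.get? w).or (pvPick days w) := by
  induction days generalizing st with
  | nil => simp [pvPick]
  | cons d rest ih =>
      rw [List.foldl_cons, ih, pv_stepA_get?]
      by_cases hnd : pvNormDay d = some w
      · have hfind : pvPick (d :: rest) w = some d := by
          apply List.find?_cons_of_pos
          simp [hnd]
        rw [hfind]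
        by_cases hc : st.contains w = true
        · have hsome : (st.get? w).isSome := by
            rw [← PySem.Dict.contains_eq_isSome_get?]; exact hc
          obtain ⟨v, hvv⟩ := Option.isSome_iff_exists.mp hsome
          simp [hc, hvv]
        · have hc' : st.contains w = false := by
            cases h : st.contains w with
            | true => exact absurd h hc
            | false => rfl
          have hnone : st.get? w = none := (PySem.Dict.get?_eq_none_iff_contains st w).mpr hc'
          simp [hnd, hc', hnone]
      · have hfind : pvPick (d :: rest) w = pvPick rest w := by
          apply List.find?_cons_of_neg
          simp [hnd]
        rw [hfind]
        simp [hnd]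

-- filter+lookup over a list equals filterMap of the lookup
theorem pv_filter_map_eq_filterMap {β : Type} (g : String → Option β) (dflt : β) (l : List String) :
    (l.filter (fun w => (g w).isSome)).map (fun w => (g w).getD dflt) = l.filterMap g := by
  induction l with
  | nil => rfl
  | cons x xs ih =>
      cases hg : g x with
      | none => simp [hg, ih]
      | some v => simp [hg, ih]

theorem pv_trimOpt_eq (opt : List (String × List (List (String × String)))) :
    pvTrimOptA opt = pvTrimOptB opt := by
  unfold pvTrimOptA pvTrimOptB
  set days := (PySem.Dict.mk opt).getD "days" [] with hdays
  have hget : ∀ w, (days.foldl pvStepA PySem.Dict.empty).get? w = pvPick days w := by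
    intro w
    rw [pv_foldl_get?]
    simp
  have hcont : ∀ w, (days.foldl pvStepA PySem.Dict.empty).contains w = (pvPick days w).isSome := by
    intro w
    rw [PySem.Dict.contains_eq_isSome_get?, hget]
  have hgetD : ∀ w, (days.foldl pvStepA PySem.Dict.empty).getD w [] = (pvPick days w).getD [] := by
    intro w
    rw [PySem.Dict.getD_eq_get?_getD, hget]
  simp only [hcont]
  have hmap : (pvValidDays.filter (fun w => (pvPick days w).isSome)).map
      (fun w => (days.foldl pvStepA PySem.Dict.empty).getD w []) =
      pvValidDays.filterMap (fun w => pvPick days w) := by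
    rw [List.map_congr_left (fun w _ => hgetD w)]
    exact pv_filter_map_eq_filterMap (fun w => pvPick days w) [] pvValidDays
  rw [hmap]
  have hlen : (pvValidDays.filterMap (fun w => pvPick days w)).length ≤ 7 := by
    calc (pvValidDays.filterMap (fun w => pvPick days w)).length
        ≤ pvValidDays.length := List.length_filterMap_le _ _
      _ = 7 := rfl
  rw [List.take_of_length_le hlen]

theorem pv_foldl_append {α β : Type} (f : α → β) (l : List α) (acc : List β) :
    l.foldl (fun a x => a ++ [f x]) acc = acc ++ l.map f := by
  induction l generalizing acc with
  | nil => simp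
  | cons x xs ih => simp [ih]

-- ===== VERDICT (by name: the statement is the Claim_ definition above) =====
theorem trim_to_seven_days_py_spec : Claim_equal_trim_to_seven_days_py := by
  intro meal_plan _ _
  unfold Spec_trim_to_seven_days_py trim_to_seven_days_py trim_to_seven_days_py_alt
  simp only [pv_foldl_append, List.nil_append]
  rw [List.map_congr_left (fun opt _ => pv_trimOpt_eq opt)]
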